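-- pv_equiv track=rewrite | github.com/Ozen7/CMSC818J-PaperSims | Simulators-v2/MatRaptor/MatRaptorClasses.py | csr_to_c2sr
-- ===== SOURCE A (Python) =====
-- def csr_to_c2sr(data, indices, indptr, num_channels):
--     # Create arrays to store C2SR format data
--     c2sr_values = [[] for _ in range(num_channels)]
--     c2sr_column_ids = [[] for _ in range(num_channels)]
--     c2sr_row_length = []
--     c2sr_row_pointer = []
--
--     # Loop through each row in CSR format
--     for i in range(len(indptr) - 1):
--         # Get the start and end indices for the current row in CSR format
--         start_idx = indptr[i]
--         end_idx = indptr[i + 1]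
--
--         # Get the channel assigned to the current row
--         channel = i % num_channels
--
--         # Append the row length and row pointer for the current row in C2SR format
--         c2sr_row_length.append((channel, end_idx - start_idx))
--         c2sr_row_pointer.append((channel, len(c2sr_values[channel])))
--
--         # Loop through the non-zero elements of the current row
--         for j in range(start_idx, end_idx):
--             # Append the value and column id for the current element in C2SR format
--             c2sr_values[channel].append(data[j])
--             c2sr_column_ids[channel].append(indices[j])
--
--
--
--
--     return c2sr_values, c2sr_column_ids, c2sr_row_length, c2sr_row_pointer
-- ===== SOURCE B (Python) =====
-- def csr_to_c2sr(data, indices, indptr, num_channels):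
--     nrows = len(indptr) - 1
--     # row lengths in closed form, row-major
--     c2sr_row_length = [(i % num_channels, indptr[i + 1] - indptr[i])
--                        for i in range(nrows)]
--     # channel-major pass: each channel owns rows c, c+nc, c+2*nc, ...
--     c2sr_values = []
--     c2sr_column_ids = []
--     c2sr_row_pointer = [(0, 0)] * nrows  # every slot is overwritten below
--     for c in range(num_channels):
--         vals = []
--         cols = []
--         for i in range(c, nrows, num_channels):
--             c2sr_row_pointer[i] = (c, len(vals))
--             vals += [data[j] for j in range(indptr[i], indptr[i + 1])]
--             cols += [indices[j] for j in range(indptr[i], indptr[i + 1])]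
--         c2sr_values.append(vals)
--         c2sr_column_ids.append(cols)
--     return c2sr_values, c2sr_column_ids, c2sr_row_length, c2sr_row_pointer
-- ===== Notes on version B (the rewrite author's own statement) =====
-- stated objective: alternative
-- what changed: Replaces A's single row-major pass that appends into per-channel buckets selected by i % num_channels with a channel-major decomposition: row lengths are a closed-form comprehension, and for each channel the strided row range(c, nrows, num_channels) is walked once, concatenating its rows' values/column ids and assigning row pointers into a preallocated list from a per-channel running length.
import Mathlib
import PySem

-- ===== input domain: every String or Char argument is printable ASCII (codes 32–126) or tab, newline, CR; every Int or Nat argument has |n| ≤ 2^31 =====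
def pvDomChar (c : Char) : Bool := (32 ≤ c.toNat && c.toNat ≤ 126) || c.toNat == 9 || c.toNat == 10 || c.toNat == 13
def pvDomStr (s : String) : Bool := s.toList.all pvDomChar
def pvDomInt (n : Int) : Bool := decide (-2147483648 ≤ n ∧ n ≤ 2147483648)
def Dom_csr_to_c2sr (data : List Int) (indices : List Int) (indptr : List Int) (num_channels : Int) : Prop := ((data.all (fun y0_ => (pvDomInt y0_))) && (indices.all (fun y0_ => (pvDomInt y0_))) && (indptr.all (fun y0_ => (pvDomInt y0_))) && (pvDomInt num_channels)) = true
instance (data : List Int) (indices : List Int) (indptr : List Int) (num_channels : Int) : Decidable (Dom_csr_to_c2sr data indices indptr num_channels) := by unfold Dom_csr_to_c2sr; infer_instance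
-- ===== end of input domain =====

-- B replaces A's single stateful row-major bucket-appending pass by four independent
-- closed-form comprehensions (channel-major values, per-row closed-form pointers); alternative, not faster.

-- ===== PORT A =====
-- Literal transliteration of A: one stateful fold over the rows (range(len(indptr)-1)),
-- appending into the per-channel bucket lists and the row_length/row_pointer lists.
-- indptr[i]/data[j]/indices[j] use pyGetD (Python negative-index semantics; the default 0 is
-- unreachable inside Pre_); c2sr_values[channel] uses .toNat/.getD/.set, faithful since Pre_
-- forces 0 ≤ channel < num_channels whenever the loop body runs.
def pvStepA (data indices indptr : List Int) (num_channels : Int)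
    (st : List (List Int) × List (List Int) × (List (Int × Int)) × (List (Int × Int))) (i : Nat) :
    List (List Int) × List (List Int) × (List (Int × Int)) × (List (Int × Int)) :=
  let start := PySem.List.pyGetD indptr (i : Int) 0
  let stop := PySem.List.pyGetD indptr ((i : Int) + 1) 0
  let channel := PySem.Int.mod (i : Int) num_channels
  let ch := channel.toNat
  let rlen := st.2.2.1 ++ [(channel, stop - start)]
  let rptr := st.2.2.2 ++ [(channel, ((st.1.getD ch []).length : Int))]
  let vc := (PySem.List.pyRange start stop 1).foldl
      (fun (p : List (List Int) × List (List Int)) j =>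
        (p.1.set ch (p.1.getD ch [] ++ [PySem.List.pyGetD data j 0]),
         p.2.set ch (p.2.getD ch [] ++ [PySem.List.pyGetD indices j 0])))
      (st.1, st.2.1)
  (vc.1, vc.2, rlen, rptr)

def csr_to_c2sr (data : List Int) (indices : List Int) (indptr : List Int) (num_channels : Int) : List (List Int) × List (List Int) × (List (Int × Int)) × (List (Int × Int)) :=
  (List.range (indptr.length - 1)).foldl (pvStepA data indices indptr num_channels)
    (List.replicate num_channels.toNat [], List.replicate num_channels.toNat [], [], [])

-- ===== PORT B =====
-- indptr[k] for a loop index k (always in range inside Pre_)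
def pvIp (indptr : List Int) (k : Nat) : Int := PySem.List.pyGetD indptr (k : Int) 0

def csr_to_c2sr_alt (data : List Int) (indices : List Int) (indptr : List Int) (num_channels : Int) : List (List Int) × List (List Int) × (List (Int × Int)) × (List (Int × Int)) :=
  let nrows := indptr.length - 1   -- Python len(indptr)-1; range() clamps negatives exactly as Nat subtraction does
  -- row lengths in closed form, row-major
  let rlen := (List.range nrows).map (fun (i : Nat) =>
      (PySem.Int.mod (i : Int) num_channels, pvIp indptr (i + 1) - pvIp indptr i))
  -- channel-major pass: channel c owns rows c, c+nc, c+2nc, …; pointer slot i is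
  -- assigned (c, len(vals)) before vals is extended with row i's values
  let fin := (PySem.List.pyRange 0 num_channels 1).foldl
    (fun (acc : List (List Int) × List (List Int) × List (Int × Int)) c =>
      let t := (PySem.List.pyRange c (nrows : Int) num_channels).foldl
        (fun (st : List Int × List Int × List (Int × Int)) i =>
          (st.1 ++ (PySem.List.pyRange (PySem.List.pyGetD indptr i 0) (PySem.List.pyGetD indptr (i + 1) 0) 1).map
              (fun j => PySem.List.pyGetD data j 0),
           st.2.1 ++ (PySem.List.pyRange (PySem.List.pyGetD indptr i 0) (PySem.List.pyGetD indptr (i + 1) 0) 1).map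
              (fun j => PySem.List.pyGetD indices j 0),
           st.2.2.set i.toNat (c, (st.1.length : Int))))
        ([], [], acc.2.2)
      (acc.1 ++ [t.1], acc.2.1 ++ [t.2.1], t.2.2))
    ([], [], List.replicate nrows ((0 : Int), (0 : Int)))
  (fin.1, fin.2.1, rlen, fin.2.2)

-- ===== PRECONDITION & SPEC =====
-- Pre_ excludes exactly the inputs where Python A raises: ZeroDivisionError/IndexError from
-- i % num_channels / c2sr_values[channel] when num_channels ≤ 0 and there is at least one row,
-- and IndexError from data[j]/indices[j] when some row's index window [indptr[i], indptr[i+1))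
-- leaves the Python-valid index range [-len, len) of data or indices.
def Pre_csr_to_c2sr (data : List Int) (indices : List Int) (indptr : List Int) (num_channels : Int) : Prop :=
  (indptr.length ≤ 1 ∨ 0 < num_channels) ∧
  ∀ p ∈ indptr.zip indptr.tail, p.1 < p.2 →
    (-(data.length : Int) ≤ p.1 ∧ p.2 ≤ (data.length : Int) ∧
     -(indices.length : Int) ≤ p.1 ∧ p.2 ≤ (indices.length : Int))
instance (data : List Int) (indices : List Int) (indptr : List Int) (num_channels : Int) : Decidable (Pre_csr_to_c2sr data indices indptr num_channels) := by unfold Pre_csr_to_c2sr; infer_instance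

def pvWitness_csr_to_c2sr : List Int × List Int × List Int × Int := ([5, 6, 7], [0, 2, 1], [0, 1, 3], 2)

def Spec_csr_to_c2sr (data : List Int) (indices : List Int) (indptr : List Int) (num_channels : Int) (out : List (List Int) × List (List Int) × (List (Int × Int)) × (List (Int × Int))) : Prop := out = csr_to_c2sr_alt data indices indptr num_channels
instance (data : List Int) (indices : List Int) (indptr : List Int) (num_channels : Int) (out : List (List Int) × List (List Int) × (List (Int × Int)) × (List (Int × Int))) : Decidable (Spec_csr_to_c2sr data indices indptr num_channels out) := by unfold Spec_csr_to_c2sr; infer_instance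

-- ===== CLAIM (what is proved, stated in full; the proofs are below) =====
def Claim_equal_csr_to_c2sr : Prop := ∀ (data : List Int) (indices : List Int) (indptr : List Int) (num_channels : Int), Dom_csr_to_c2sr data indices indptr num_channels → Pre_csr_to_c2sr data indices indptr num_channels → Spec_csr_to_c2sr data indices indptr num_channels (csr_to_c2sr data indices indptr num_channels)

-- ===== LEMMAS AND PROOFS =====

-- the comprehension [src[j] for j in range(indptr[i], indptr[i+1])]
def pvSeg (src indptr : List Int) (i : Nat) : List Int :=
  (PySem.List.pyRange (pvIp indptr i) (pvIp indptr (i + 1)) 1).map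
    (fun j => PySem.List.pyGetD src j 0)


def pvSpec (data indices indptr : List Int) (nc : Int) (k : Nat) : List (List Int) × List (List Int) × (List (Int × Int)) × (List (Int × Int)) :=
  ((List.range nc.toNat).map (fun c =>
      ((List.range k).filter (fun i => i % nc.toNat == c)).flatMap (pvSeg data indptr)),
   (List.range nc.toNat).map (fun c =>
      ((List.range k).filter (fun i => i % nc.toNat == c)).flatMap (pvSeg indices indptr)),
   (List.range k).map (fun (i : Nat) =>
      (PySem.Int.mod (i : Int) nc, pvIp indptr (i + 1) - pvIp indptr i)),
   (List.range k).map (fun (i : Nat) =>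
      (PySem.Int.mod (i : Int) nc,
       ((((List.range i).filter (fun j => j % nc.toNat == i % nc.toNat)).flatMap (pvSeg data indptr)).length : Int))))

lemma pv_mod_cast (i : Nat) (nc : Int) (h : 0 < nc) :
    PySem.Int.mod (i : Int) nc = ((i % nc.toNat : Nat) : Int) := by
  rw [PySem.Int.mod_eq_emod_of_pos h]
  have : nc = (nc.toNat : Int) := by omega
  rw [this]; push_cast; simp

lemma pv_getD_oob (v : List (List Int)) (ch : Nat) (h : ¬ ch < v.length) : v.getD ch [] = [] := by
  simp [List.getD_eq_getElem?_getD, List.getElem?_eq_none (by omega : v.length ≤ ch)]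

lemma pv_set_append_step (v : List (List Int)) (ch : Nat) (a b : List Int) :
    (v.set ch (v.getD ch [] ++ a)).set ch ((v.set ch (v.getD ch [] ++ a)).getD ch [] ++ b)
    = v.set ch (v.getD ch [] ++ (a ++ b)) := by
  by_cases h : ch < v.length
  · simp [List.getD_eq_getElem?_getD, h, List.set_set, List.append_assoc]
  · have hle : v.length ≤ ch := by omega
    rw [List.set_eq_of_length_le hle, List.set_eq_of_length_le hle, List.set_eq_of_length_le hle]

lemma pv_inner_fold (f g : Int → Int) (L : List Int) (ch : Nat) (v w : List (List Int)) :
    L.foldl (fun (p : List (List Int) × List (List Int)) j =>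
        (p.1.set ch (p.1.getD ch [] ++ [f j]), p.2.set ch (p.2.getD ch [] ++ [g j]))) (v, w)
    = (v.set ch (v.getD ch [] ++ L.map f), w.set ch (w.getD ch [] ++ L.map g)) := by
  induction L generalizing v w with
  | nil =>
      simp only [List.foldl_nil, List.map_nil, List.append_nil]
      by_cases hv : ch < v.length
      · by_cases hw : ch < w.length
        · rw [List.getD_eq_getElem v [] hv, List.getD_eq_getElem w [] hw,
              List.set_getElem_self, List.set_getElem_self]
        · rw [List.getD_eq_getElem v [] hv, List.set_getElem_self,
              pv_getD_oob w ch hw, List.set_eq_of_length_le (by omega)]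
      · by_cases hw : ch < w.length
        · rw [List.getD_eq_getElem w [] hw, List.set_getElem_self,
              pv_getD_oob v ch hv, List.set_eq_of_length_le (by omega)]
        · rw [pv_getD_oob v ch hv, pv_getD_oob w ch hw,
              List.set_eq_of_length_le (by omega), List.set_eq_of_length_le (by omega)]
  | cons x xs ih =>
      simp only [List.foldl_cons, ih, List.map_cons]
      rw [pv_set_append_step v ch [f x] (xs.map f), pv_set_append_step w ch [g x] (xs.map g)]
      simp

lemma pv_getD_map_range {α : Type} (F : Nat → α) (m ch : Nat) (d : α) (h : ch < m) :
    ((List.range m).map F).getD ch d = F ch := by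
  rw [List.getD_eq_getElem ((List.range m).map F) d (by simpa using h)]
  simp

lemma pv_set_map_range {α : Type} (F F' : Nat → α) (m ch : Nat) (h : ch < m)
    (heq : ∀ c, c < m → c ≠ ch → F' c = F c) :
    ((List.map F (List.range m)).set ch (F' ch)) = List.map F' (List.range m) := by
  apply List.ext_getElem
  · simp
  · intro n h1 h2
    simp only [List.length_set, List.length_map, List.length_range] at h1
    by_cases hn : n = ch
    · subst hn; simp [List.getElem_set_self]
    · rw [List.getElem_set_ne (by omega)]
      simp [heq n h1 (by omega)]

lemma pv_filter_range_succ (k m c : Nat) :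
    (List.range (k + 1)).filter (fun i => i % m == c)
    = (List.range k).filter (fun i => i % m == c) ++ if k % m == c then [k] else [] := by
  rw [List.range_succ, List.filter_append]
  simp [List.filter_singleton]

lemma pv_A_inv (data indices indptr : List Int) (nc : Int) (h : 0 < nc) (k : Nat) :
    (List.range k).foldl (pvStepA data indices indptr nc)
      (List.replicate nc.toNat [], List.replicate nc.toNat [], [], [])
    = pvSpec data indices indptr nc k := by
  induction k with
  | zero => simp [pvSpec, List.map_const']
  | succ k ih =>
      rw [List.range_succ, List.foldl_append, ih, List.foldl_cons, List.foldl_nil]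
      have hm : 0 < nc.toNat := by omega
      have hch : (PySem.Int.mod (k : Int) nc).toNat = k % nc.toNat := by
        rw [pv_mod_cast k nc h]; omega
      have hlt : k % nc.toNat < nc.toNat := Nat.mod_lt _ hm
      simp only [pvStepA, pvSpec, hch, pv_inner_fold]
      simp only [Prod.mk.injEq]
      refine ⟨?_, ?_, ?_, ?_⟩
      · -- values
        rw [pv_getD_map_range _ _ _ _ hlt]
        have : (PySem.List.pyRange (PySem.List.pyGetD indptr (k : Int) 0)
                 (PySem.List.pyGetD indptr ((k : Int) + 1) 0) 1).map
                 (fun j => PySem.List.pyGetD data j 0) = pvSeg data indptr k := by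
          simp [pvSeg, pvIp]
        rw [this]
        have := pv_set_map_range
          (fun c => ((List.range k).filter (fun i => i % nc.toNat == c)).flatMap (pvSeg data indptr))
          (fun c => ((List.range (k+1)).filter (fun i => i % nc.toNat == c)).flatMap (pvSeg data indptr))
          nc.toNat (k % nc.toNat) hlt ?_
        · rw [← this]
          beta_reduce
          rw [pv_filter_range_succ]
          simp
        · intro c hc hne
          beta_reduce
          rw [pv_filter_range_succ]
          simp [Ne.symm hne]
      · -- column ids
        rw [pv_getD_map_range _ _ _ _ hlt]
        have hseg : (PySem.List.pyRange (PySem.List.pyGetD indptr (k : Int) 0)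
                 (PySem.List.pyGetD indptr ((k : Int) + 1) 0) 1).map
                 (fun j => PySem.List.pyGetD indices j 0) = pvSeg indices indptr k := by
          simp [pvSeg, pvIp]
        rw [hseg]
        have h2 := pv_set_map_range
          (fun c => ((List.range k).filter (fun i => i % nc.toNat == c)).flatMap (pvSeg indices indptr))
          (fun c => ((List.range (k+1)).filter (fun i => i % nc.toNat == c)).flatMap (pvSeg indices indptr))
          nc.toNat (k % nc.toNat) hlt ?_
        · rw [← h2]
          beta_reduce
          rw [pv_filter_range_succ]
          simp
        · intro c hc hne
          beta_reduce
          rw [pv_filter_range_succ]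
          simp [Ne.symm hne]
      · -- row lengths
        rw [List.range_succ, List.map_append]
        simp [pvIp]
      · -- row pointers
        rw [List.range_succ, List.map_append]
        rw [pv_getD_map_range _ _ _ _ hlt]
        simp

lemma pv_eq_of_mem_pairwise (l1 l2 : List Int) (h1 : l1.Pairwise (· < ·)) (h2 : l2.Pairwise (· < ·))
    (hm : ∀ x, x ∈ l1 ↔ x ∈ l2) : l1 = l2 := by
  exact List.Perm.eq_of_pairwise (fun a b _ _ hab hba => absurd hba (lt_asymm hab)) h1 h2
    ((List.perm_ext_iff_of_nodup h1.nodup h2.nodup).mpr hm)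

def pvRows (nrows m c : Nat) : List Nat := (List.range nrows).filter (fun i => i % m == c)

lemma pv_stride_eq (n c : Nat) (nc : Int) (h : 0 < nc) (hc : c < nc.toNat) :
    PySem.List.pyRange (c : Int) (n : Int) nc = (pvRows n nc.toNat c).map (Nat.cast : Nat → Int) := by
  apply pv_eq_of_mem_pairwise
  · rw [PySem.List.pyRange_of_pos _ _ h]
    refine List.pairwise_map.mpr ?_
    refine List.pairwise_lt_range.imp ?_
    intro a b hab
    nlinarith
  · refine List.pairwise_map.mpr ?_
    refine (List.pairwise_lt_range.filter _).imp ?_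
    intro a b hab
    exact_mod_cast hab
  · intro x
    rw [PySem.List.mem_pyRange_iff_of_pos h]
    unfold pvRows
    simp only [List.mem_map, List.mem_filter, List.mem_range]
    constructor
    · rintro ⟨hcx, hxn, hdvd⟩
      refine ⟨x.toNat, ⟨by omega, ?_⟩, by omega⟩
      have hx0 : (0:Int) ≤ x := by omega
      have hxc : x % nc = c := by
        have h0 : (x - c) % nc = 0 := Int.emod_eq_zero_of_dvd hdvd
        have h2 : x % nc = (c : Int) % nc := Int.emod_eq_emod_iff_emod_sub_eq_zero.mpr h0
        rw [h2, Int.emod_eq_of_lt (by omega) (by omega)]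
      have : ((x.toNat % nc.toNat : Nat) : Int) = (c : Int) := by
        push_cast
        rw [Int.toNat_of_nonneg hx0, Int.ofNat_toNat]
        rw [← hxc]
        congr 1
        omega
      simp only [beq_iff_eq]
      exact_mod_cast this
    · rintro ⟨i, ⟨hin, him⟩, rfl⟩
      simp only [beq_iff_eq] at him
      have hle : c ≤ i := him ▸ Nat.mod_le i nc.toNat
      refine ⟨by exact_mod_cast hle, by exact_mod_cast hin, ?_⟩
      have : ((i % nc.toNat : Nat) : Int) = ((c : Nat) : Int) := by exact_mod_cast him
      push_cast at this
      rw [Int.ofNat_toNat] at this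
      have hmod : (i : Int) % nc = c := by
        calc (i:Int) % nc = (i:Int) % (max nc 0) := by rw [max_eq_left h.le]
        _ = c := this
      have hc' : (c : Int) % nc = c := Int.emod_eq_of_lt (Int.natCast_nonneg c) (by omega)
      have h0 : ((i : Int) - c) % nc = 0 := by
        rw [Int.sub_emod, hmod, hc']
        simp
      exact Int.dvd_of_emod_eq_zero h0

lemma pv_setfold_length (l : List Nat) (f : Nat → Int × Int) (P : List (Int × Int)) :
    (l.foldl (fun P i => P.set i (f i)) P).length = P.length := by
  induction l generalizing P with
  | nil => rfl
  | cons a l ih => simp [ih]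

lemma pv_setfold_getElem (l : List Nat) (f : Nat → Int × Int) (P : List (Int × Int)) (j : Nat) :
    (l.foldl (fun P i => P.set i (f i)) P)[j]?
    = if j ∈ l ∧ j < P.length then some (f j) else P[j]? := by
  induction l generalizing P with
  | nil => simp
  | cons a l ih =>
      rw [List.foldl_cons, ih, List.length_set]
      by_cases hjl : j ∈ l
      · by_cases hlen : j < P.length
        · simp [hjl, hlen]
        · simp [hjl, hlen]
      · by_cases hja : j = a
        · subst hja
          by_cases hlen : j < P.length
          · simp [hjl, hlen]
          · simp [hjl, hlen]
        · rw [if_neg (by simp [hja, hjl]), if_neg (by simp [hja, hjl]),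
              List.getElem?_set_ne (by omega)]

lemma pv_inner2 (data indices indptr : List Int) (cI : Int) (r : List Nat)
    (hr : r.Pairwise (· < ·)) (v0 c0 : List Int) (P : List (Int × Int)) :
    (r.map (Nat.cast : Nat → Int)).foldl
      (fun (st : List Int × List Int × List (Int × Int)) i =>
        (st.1 ++ (PySem.List.pyRange (PySem.List.pyGetD indptr i 0) (PySem.List.pyGetD indptr (i + 1) 0) 1).map
            (fun j => PySem.List.pyGetD data j 0),
         st.2.1 ++ (PySem.List.pyRange (PySem.List.pyGetD indptr i 0) (PySem.List.pyGetD indptr (i + 1) 0) 1).map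
            (fun j => PySem.List.pyGetD indices j 0),
         st.2.2.set i.toNat (cI, (st.1.length : Int)))) (v0, c0, P)
    = (v0 ++ r.flatMap (pvSeg data indptr), c0 ++ r.flatMap (pvSeg indices indptr),
       r.foldl (fun P i => P.set i
         (cI, ((v0.length : Int) + ((r.filter (fun j => decide (j < i))).flatMap (pvSeg data indptr)).length))) P) := by
  induction r generalizing v0 c0 P with
  | nil => simp
  | cons a r ih =>
      have ha : ∀ x ∈ r, a < x := fun x hx => (List.pairwise_cons.mp hr).1 x hx
      simp only [List.map_cons, List.foldl_cons, List.flatMap_cons]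
      have hcast1 : PySem.List.pyGetD indptr ((a : Int)) 0 = pvIp indptr a := rfl
      have hcast2 : PySem.List.pyGetD indptr ((a : Int) + 1) 0 = pvIp indptr (a + 1) := by
        unfold pvIp
        norm_cast
      rw [hcast1, hcast2]
      rw [ih (List.pairwise_cons.mp hr).2]
      refine Prod.ext ?_ (Prod.ext ?_ ?_)
    -- values
      · show (v0 ++ pvSeg data indptr a) ++ _ = _
        rw [List.append_assoc]
      · show (c0 ++ pvSeg indices indptr a) ++ _ = _
        rw [List.append_assoc]
      · have hhead : (List.filter (fun j => decide (j < a)) (a :: r)) = [] := by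
          rw [List.filter_eq_nil_iff]
          intro x hx
          simp only [decide_eq_true_eq]
          rcases List.mem_cons.mp hx with rfl | hx
          · omega
          · have := ha x hx
            omega
        dsimp only
        rw [hhead, Int.toNat_natCast]
        simp only [List.flatMap_nil, List.length_nil, Nat.cast_zero, add_zero]
        apply PySem.List.foldl_congr_mem
        intro Q x hx
        have hax : a < x := ha x hx
        have hfil : (a :: r).filter (fun j => decide (j < x)) = a :: r.filter (fun j => decide (j < x)) := by
          simp [hax]
        rw [hfil]
        have hval : ∀ X Y : Int, X = Y → Q.set x (cI, X) = Q.set x (cI, Y) := fun X Y hxy => by rw [hxy]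
        apply hval
        show ((v0 ++ pvSeg data indptr a).length : Int) + _ = _
        simp only [List.flatMap_cons, List.length_append]
        push_cast
        ring

lemma pv_rows_filter (n m c j : Nat) (hj : j ≤ n) :
    (pvRows n m c).filter (fun t => decide (t < j)) = pvRows j m c := by
  unfold pvRows
  rw [List.filter_filter]
  obtain ⟨d, rfl⟩ : ∃ d, n = j + d := ⟨n - j, by omega⟩
  rw [List.range_add, List.filter_append]
  have h1 : (List.range j).filter (fun a => decide (a < j) && (a % m == c))
      = (List.range j).filter (fun a => a % m == c) := by
    apply List.filter_congr
    intro a ha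
    simp [List.mem_range.mp ha]
  have h2 : ((List.range d).map (fun x => j + x)).filter (fun a => decide (a < j) && (a % m == c)) = [] := by
    rw [List.filter_eq_nil_iff]
    intro x hx
    rcases List.mem_map.mp hx with ⟨y, _, rfl⟩
    simp
  rw [h1, h2, List.append_nil]

lemma pv_outer (data indices indptr : List Int) (nc : Int) (h : 0 < nc) (k : Nat)
    (hk : k ≤ nc.toNat) :
    (((List.range k).map (Nat.cast : Nat → Int)).foldl
      (fun (acc : List (List Int) × List (List Int) × List (Int × Int)) c =>
        let t := (PySem.List.pyRange c ((indptr.length - 1 : Nat) : Int) nc).foldl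
          (fun (st : List Int × List Int × List (Int × Int)) i =>
            (st.1 ++ (PySem.List.pyRange (PySem.List.pyGetD indptr i 0) (PySem.List.pyGetD indptr (i + 1) 0) 1).map
                (fun j => PySem.List.pyGetD data j 0),
             st.2.1 ++ (PySem.List.pyRange (PySem.List.pyGetD indptr i 0) (PySem.List.pyGetD indptr (i + 1) 0) 1).map
                (fun j => PySem.List.pyGetD indices j 0),
             st.2.2.set i.toNat (c, (st.1.length : Int))))
          ([], [], acc.2.2)
        (acc.1 ++ [t.1], acc.2.1 ++ [t.2.1], t.2.2))
      ([], [], List.replicate (indptr.length - 1) ((0 : Int), (0 : Int))))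
    = ((List.range k).map (fun c => (pvRows (indptr.length - 1) nc.toNat c).flatMap (pvSeg data indptr)),
       (List.range k).map (fun c => (pvRows (indptr.length - 1) nc.toNat c).flatMap (pvSeg indices indptr)),
       (List.range (indptr.length - 1)).map (fun j =>
         if j % nc.toNat < k then
           (((j % nc.toNat : Nat) : Int),
            ((((List.range j).filter (fun t => t % nc.toNat == j % nc.toNat)).flatMap (pvSeg data indptr)).length : Int))
         else ((0 : Int), (0 : Int)))) := by
  induction k with
  | zero =>
      simp only [List.range_zero, List.map_nil, List.foldl_nil]
      refine Prod.ext rfl (Prod.ext rfl ?_)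
      show List.replicate (indptr.length - 1) ((0 : Int), (0 : Int)) = _
      apply List.ext_getElem
      · simp
      · intro j hj1 hj2
        simp only [List.getElem_replicate, List.getElem_map, List.getElem_range]
        rw [if_neg (by omega)]
  | succ k ih =>
      have hkm : k < nc.toNat := by omega
      rw [List.range_succ, List.map_append, List.foldl_append, ih (by omega)]
      simp only [List.map_cons, List.map_nil, List.foldl_cons, List.foldl_nil]
      rw [pv_stride_eq (indptr.length - 1) k nc h hkm]
      rw [pv_inner2 data indices indptr ((k : Nat) : Int) (pvRows (indptr.length - 1) nc.toNat k)
            (by unfold pvRows; exact (List.pairwise_lt_range).filter _) [] [] _]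
      refine Prod.ext ?_ (Prod.ext ?_ ?_)
      · show _ ++ [[] ++ _] = _
        simp
      · show _ ++ [[] ++ _] = _
        simp
      · show List.foldl _ _ (pvRows (indptr.length - 1) nc.toNat k) = _
        apply List.ext_getElem
        · rw [pv_setfold_length]
          simp
        · intro j hj1 hj2
          rw [pv_setfold_length] at hj1
          simp only [List.length_map, List.length_range] at hj1 hj2
          have hjmem : (j ∈ pvRows (indptr.length - 1) nc.toNat k) ↔ j % nc.toNat = k := by
            unfold pvRows
            simp [List.mem_filter, List.mem_range, hj1]
          rw [List.getElem_eq_iff]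
          dsimp only
          rw [pv_setfold_getElem]
          rw [List.getElem_map, List.getElem_range]
          by_cases hjc : j % nc.toNat = k
          · rw [if_pos ⟨hjmem.mpr hjc, by simp [hj1]⟩]
            rw [if_pos (by omega)]
            rw [pv_rows_filter _ _ _ _ (le_of_lt hj1)]
            simp [pvRows, hjc]
          · rw [if_neg (by rw [hjmem]; simp [hjc])]
            rw [List.getElem?_map, List.getElem?_range hj1]
            simp only [Option.map_some]
            by_cases hlt : j % nc.toNat < k
            · rw [if_pos hlt, if_pos (by omega)]
            · rw [if_neg hlt, if_neg (by omega)]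

lemma pv_A_eq (data indices indptr : List Int) (nc : Int) (h : 0 < nc) :
    csr_to_c2sr data indices indptr nc = pvSpec data indices indptr nc (indptr.length - 1) := by
  exact pv_A_inv data indices indptr nc h (indptr.length - 1)

lemma pv_B_eq (data indices indptr : List Int) (nc : Int) (h : 0 < nc) :
    csr_to_c2sr_alt data indices indptr nc = pvSpec data indices indptr nc (indptr.length - 1) := by
  have hrange : PySem.List.pyRange 0 nc 1 = List.map (Nat.cast : Nat → Int) (List.range nc.toNat) := by
    rw [PySem.List.pyRange_one, Int.sub_zero]
    exact List.map_congr_left (fun k _ => Int.zero_add _)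
  simp only [csr_to_c2sr_alt]
  rw [hrange, pv_outer data indices indptr nc h nc.toNat (le_refl _)]
  unfold pvSpec
  refine Prod.ext ?_ (Prod.ext ?_ (Prod.ext ?_ ?_))
  · rfl
  · rfl
  · rfl
  · show List.map _ _ = _
    apply List.map_congr_left
    intro j hj
    rw [if_pos (Nat.mod_lt _ (by omega))]
    refine Prod.ext ?_ rfl
    show ((j % nc.toNat : Nat) : Int) = PySem.Int.mod (j : Int) nc
    rw [pv_mod_cast j nc h]

lemma pv_nonpos_case (data indices indptr : List Int) (nc : Int)
    (h1 : indptr.length ≤ 1) (h2 : nc ≤ 0) :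
    csr_to_c2sr data indices indptr nc = csr_to_c2sr_alt data indices indptr nc := by
  have hn : indptr.length - 1 = 0 := by omega
  simp [csr_to_c2sr, csr_to_c2sr_alt, hn, PySem.List.pyRange_one_eq_nil h2, Int.toNat_of_nonpos h2]

-- ===== VERDICT (by name: the statement is the Claim_ definition above) =====
theorem csr_to_c2sr_spec : Claim_equal_csr_to_c2sr := by
  intro data indices indptr nc _ hpre
  unfold Spec_csr_to_c2sr
  by_cases h : 0 < nc
  · rw [pv_A_eq data indices indptr nc h, pv_B_eq data indices indptr nc h]
  · rcases hpre.1 with h1 | h1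
    · exact pv_nonpos_case data indices indptr nc h1 (by omega)
    · omega
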